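-- pv_equiv track=rewrite | github.com/ShiroOkuto/m_f_p | mediaflow_proxy/routes/playlist_builder.py | parse_channel_entries
-- ===== SOURCE A (Python) =====
-- def parse_channel_entries(lines: list[str]) -> list[list[str]]:
--     """
--     Analizza le linee di una playlist M3U e le raggruppa in entry di canali.
--     Ogni entry contiene tutto ciò che si trova tra un #EXTINF e il successivo.
--     """
--     entries = []
--     current_entry = []
--     for line in lines:
--         if line.strip().startswith("#EXTINF:"):
--             if current_entry:
--                 entries.append(current_entry)
--             current_entry = [line]
--         elif current_entry:
--             current_entry.append(line)
--     if current_entry: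
--         entries.append(current_entry)
--     return entries
-- ===== SOURCE B (Python) =====
-- def parse_channel_entries(lines: list[str]) -> list[list[str]]:
--     """Index-and-slice rewrite: skip to the first #EXTINF header, then for each
--     header scan forward to the next header and slice that span out of lines."""
--     def is_header(line):
--         return line.strip().startswith("#EXTINF:")
--
--     n = len(lines)
--     i = 0
--     while i < n and not is_header(lines[i]):
--         i += 1
--     entries = []
--     while i < n:
--         j = i + 1
--         while j < n and not is_header(lines[j]):
--             j += 1
--         entries.append(lines[i:j])
--         i = j
--     return entries
-- ===== Notes on version B (the rewrite author's own statement) =====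
-- stated objective: alternative
-- what changed: Replaces A's single fold that mutates a current-entry accumulator with an index-and-slice scheme: skip to the first #EXTINF header, then repeatedly scan to the next header and slice that span out of the original list.
import Mathlib
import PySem

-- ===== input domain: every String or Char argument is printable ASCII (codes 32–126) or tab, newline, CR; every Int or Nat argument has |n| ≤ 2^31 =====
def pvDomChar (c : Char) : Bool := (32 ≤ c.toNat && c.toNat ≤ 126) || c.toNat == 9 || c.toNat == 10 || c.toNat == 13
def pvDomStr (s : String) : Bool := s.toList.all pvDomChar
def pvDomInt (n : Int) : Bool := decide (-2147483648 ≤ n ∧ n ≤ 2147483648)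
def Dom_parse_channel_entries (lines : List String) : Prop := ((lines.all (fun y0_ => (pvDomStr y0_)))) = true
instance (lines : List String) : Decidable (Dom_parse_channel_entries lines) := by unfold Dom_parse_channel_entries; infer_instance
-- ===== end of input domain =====

-- B replaces A's fold with a mutable current-entry accumulator by an index-and-slice
-- decomposition (skip to the first #EXTINF header, then slice header-to-header spans);
-- same cost, different structure ("alternative").


-- ===== PORT A =====
-- line.strip().startswith("#EXTINF:")
def pvIsHeader (line : String) : Bool :=
  PySem.Str.startswith (PySem.Str.strip line) "#EXTINF:"

-- the body of A's for-loop, state = (entries, current_entry)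
def pvStepA (s : List (List String) × List String) (line : String) :
    List (List String) × List String :=
  if pvIsHeader line then
    (if s.2.isEmpty then s.1 else s.1 ++ [s.2], [line])
  else if s.2.isEmpty then s else (s.1, s.2 ++ [line])

def parse_channel_entries (lines : List String) : List (List String) :=
  let s := lines.foldl pvStepA ([], [])
  if s.2.isEmpty then s.1 else s.1 ++ [s.2]

-- ===== PORT B =====
-- inner while: scan to the next header; the span becomes one slice of lines
def pvBuildB (rest : List String) : List (List String) :=
  match rest with
  | [] => []
  | h :: t =>
      (h :: t.takeWhile (fun l => !pvIsHeader l)) ::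
        pvBuildB (t.dropWhile (fun l => !pvIsHeader l))
termination_by rest.length
decreasing_by
  simpa using Nat.lt_succ_of_le (List.length_dropWhile_le (fun l => !pvIsHeader l) t)

def parse_channel_entries_alt (lines : List String) : List (List String) :=
  pvBuildB (lines.dropWhile (fun l => !pvIsHeader l))

-- ===== PRECONDITION & SPEC =====
def Spec_parse_channel_entries (lines : List String) (out : List (List String)) : Prop := out = parse_channel_entries_alt lines
instance (lines : List String) (out : List (List String)) : Decidable (Spec_parse_channel_entries lines out) := by unfold Spec_parse_channel_entries; infer_instance

-- ===== CLAIM (what is proved, stated in full; the proofs are below) =====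
def Claim_equal_parse_channel_entries : Prop := ∀ (lines : List String), Dom_parse_channel_entries lines → Spec_parse_channel_entries lines (parse_channel_entries lines)

-- ===== LEMMAS AND PROOFS =====

-- finalize a fold state the way A's trailing 'if current_entry' does
def pvFin (s : List (List String) × List String) : List (List String) :=
  if s.2.isEmpty then s.1 else s.1 ++ [s.2]

-- entries already collected only get appended to
theorem pvPrefix (lines : List String) :
    ∀ (entries cur : List (List String)) (c : List String),
      pvFin ((lines.foldl pvStepA (entries ++ cur, c))) =
        entries ++ pvFin (lines.foldl pvStepA (cur, c)) := by
  induction lines with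
  | nil =>
      intro entries cur c
      simp [pvFin]
      split <;> simp
  | cons l ls ih =>
      intro entries cur c
      simp only [List.foldl_cons, pvStepA]
      split
      · split
        · exact ih entries cur [l]
        · have := ih entries (cur ++ [c]) [l]
          simpa [List.append_assoc] using this
      · split
        · exact ih entries cur c
        · exact ih entries cur (c ++ [l])

-- main invariant: a nonempty current entry c0::cs turns into the slice up to the next header
theorem pvMain (lines : List String) :
    ∀ (c0 : String) (cs : List String),
      pvFin (lines.foldl pvStepA ([], c0 :: cs)) =
        ((c0 :: cs) ++ lines.takeWhile (fun l => !pvIsHeader l)) ::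
          pvBuildB (lines.dropWhile (fun l => !pvIsHeader l)) := by
  induction lines with
  | nil => intro c0 cs; simp [pvFin, pvBuildB]
  | cons l ls ih =>
      intro c0 cs
      simp only [List.foldl_cons, pvStepA]
      by_cases h : pvIsHeader l
      · simp only [h, if_pos, List.isEmpty_cons, Bool.false_eq_true, ite_false]
        have hpre := pvPrefix ls [c0 :: cs] [] [l]
        simp only [List.append_nil] at hpre
        rw [List.nil_append, hpre, ih l []]
        simp [List.takeWhile, List.dropWhile, h, pvBuildB]
      · simp only [h, List.isEmpty_cons, Bool.false_eq_true, ite_false]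
        rw [List.cons_append, ih c0 (cs ++ [l])]
        simp [List.takeWhile, List.dropWhile, h, List.append_assoc]

-- empty current entry: nothing collected until the first header
theorem pvEmptyCur (lines : List String) :
    pvFin (lines.foldl pvStepA ([], [])) =
      pvBuildB (lines.dropWhile (fun l => !pvIsHeader l)) := by
  induction lines with
  | nil => simp [pvFin, pvBuildB]
  | cons l ls ih =>
      simp only [List.foldl_cons, pvStepA]
      by_cases h : pvIsHeader l
      · simp only [h, if_pos, List.isEmpty_nil]
        rw [pvMain ls l []]
        simp [List.dropWhile, h, pvBuildB]
      · simp only [h, List.isEmpty_nil, ite_true, ite_false, Bool.false_eq_true]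
        rw [ih]
        simp [List.dropWhile, h]

-- ===== VERDICT (by name: the statement is the Claim_ definition above) =====
theorem parse_channel_entries_spec : Claim_equal_parse_channel_entries := by
  intro lines _
  show parse_channel_entries lines = parse_channel_entries_alt lines
  unfold parse_channel_entries parse_channel_entries_alt
  exact pvEmptyCur lines
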